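-- pv_equiv track=rewrite | github.com/Sharks820/jarvis-memory-repo | engine/src/jarvis_engine/brain_memory.py | _pick_branch
-- ===== SOURCE A (Python) =====
-- BRANCH_RULES: dict[str, tuple[str, ...]] = {
--     "ops": ("calendar", "email", "bill", "subscription", "schedule", "meeting", "brief"),
--     "coding": ("code", "python", "bug", "test", "refactor", "api", "deploy", "build"),
--     "health": ("med", "prescription", "doctor", "health", "pharmacy", "dose"),
--     "finance": ("budget", "bank", "invoice", "payment", "expense", "finance"),
--     "security": ("auth", "owner", "password", "safe", "security", "guard", "trusted"),
--     "learning": ("learn", "study", "research", "mission", "knowledge", "read"),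
--     "family": ("kid", "family", "school", "spouse", "home"),
--     "communications": ("call", "sms", "message", "text", "spam"),
--     "gaming": ("game", "gaming", "steam", "fps", "fortnite"),
-- }
--
-- def _pick_branch(tokens: list[str]) -> str:
--     if not tokens:
--         return "general"
--     scores: dict[str, int] = {k: 0 for k in BRANCH_RULES}
--     for token in tokens:
--         for branch, words in BRANCH_RULES.items():
--             if token in words or any(token.startswith(word) for word in words):
--                 scores[branch] += 1
--     winner = max(scores.items(), key=lambda item: item[1])
--     return winner[0] if winner[1] > 0 else "general"
-- ===== SOURCE B (Python) =====
-- BRANCH_RULES: dict[str, tuple[str, ...]] = {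
--     "ops": ("calendar", "email", "bill", "subscription", "schedule", "meeting", "brief"),
--     "coding": ("code", "python", "bug", "test", "refactor", "api", "deploy", "build"),
--     "health": ("med", "prescription", "doctor", "health", "pharmacy", "dose"),
--     "finance": ("budget", "bank", "invoice", "payment", "expense", "finance"),
--     "security": ("auth", "owner", "password", "safe", "security", "guard", "trusted"),
--     "learning": ("learn", "study", "research", "mission", "knowledge", "read"),
--     "family": ("kid", "family", "school", "spouse", "home"),
--     "communications": ("call", "sms", "message", "text", "spam"),
--     "gaming": ("game", "gaming", "steam", "fps", "fortnite"),
-- }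
--
-- # Inverted prefix index built once: rule word -> owning branch (the 55 rule
-- # words are pairwise distinct), plus the longest rule-word length.
-- _PREFIX_INDEX: dict[str, str] = {w: b for b, ws in BRANCH_RULES.items() for w in ws}
-- _MAX_WORD_LEN: int = max(map(len, _PREFIX_INDEX))
--
--
-- def _pick_branch(tokens: list[str]) -> str:
--     # Instead of scanning every branch's word tuple for every token, look each
--     # token's growing prefixes (up to the longest rule word) up in the inverted
--     # index; a hit names the owning branch directly.  A set keeps one increment
--     # per (token, branch) even if several words of a branch prefix the token.
--     if not tokens:
--         return "general"
--     scores: dict[str, int] = {k: 0 for k in BRANCH_RULES}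
--     for token in tokens:
--         hit: set[str] = set()
--         for i in range(1, min(len(token), _MAX_WORD_LEN) + 1):
--             b = _PREFIX_INDEX.get(token[:i])
--             if b is not None:
--                 hit.add(b)
--         for b in hit:
--             scores[b] += 1
--     winner = max(scores.items(), key=lambda item: item[1])
--     return winner[0] if winner[1] > 0 else "general"
-- ===== Notes on version B (the rewrite author's own statement) =====
-- stated objective: faster
-- what changed: A's inner scan of every branch's word tuple (55 startswith tests per token) is replaced by an inverted dict index (rule word -> owning branch, built once) probed with each token's growing prefixes up to the longest rule word (at most 12 hashed lookups per token), collecting the hit branches into a per-token set before incrementing the scores.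
import Mathlib
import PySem

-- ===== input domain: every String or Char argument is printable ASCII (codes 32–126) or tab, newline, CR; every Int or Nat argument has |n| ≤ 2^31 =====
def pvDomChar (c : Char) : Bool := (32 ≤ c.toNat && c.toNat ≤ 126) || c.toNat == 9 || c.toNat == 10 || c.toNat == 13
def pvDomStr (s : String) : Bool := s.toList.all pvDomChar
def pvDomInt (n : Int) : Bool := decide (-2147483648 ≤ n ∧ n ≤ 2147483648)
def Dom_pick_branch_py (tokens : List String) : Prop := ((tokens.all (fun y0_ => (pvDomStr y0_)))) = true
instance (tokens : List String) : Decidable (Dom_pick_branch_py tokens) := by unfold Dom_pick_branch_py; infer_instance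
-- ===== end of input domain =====

-- B replaces A's per-token scan of every branch's word tuple by an inverted
-- prefix index (rule word -> owning branch, built once) probed with the token's
-- growing prefixes, collecting hit branches into a per-token set (objective: faster, measured).

-- module constant BRANCH_RULES (shared by both programs)
def pvBranchRules : List (String × List String) :=
  [("ops", ["calendar", "email", "bill", "subscription", "schedule", "meeting", "brief"]),
   ("coding", ["code", "python", "bug", "test", "refactor", "api", "deploy", "build"]),
   ("health", ["med", "prescription", "doctor", "health", "pharmacy", "dose"]),
   ("finance", ["budget", "bank", "invoice", "payment", "expense", "finance"]),
   ("security", ["auth", "owner", "password", "safe", "security", "guard", "trusted"]),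
   ("learning", ["learn", "study", "research", "mission", "knowledge", "read"]),
   ("family", ["kid", "family", "school", "spouse", "home"]),
   ("communications", ["call", "sms", "message", "text", "spam"]),
   ("gaming", ["game", "gaming", "steam", "fps", "fortnite"])]

-- ===== PORT A =====
def pick_branch_py (tokens : List String) : String :=
  if tokens = [] then "general"
  else
    let scores0 : PySem.Dict String Int :=
      pvBranchRules.foldl (fun d p => d.insert p.1 0) PySem.Dict.empty
    let scores := tokens.foldl (fun d token =>
      pvBranchRules.foldl (fun d p =>
        if p.2.contains token || p.2.any (fun w => PySem.Str.startswith token w)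
        then d.modify p.1 0 (· + 1) else d) d) scores0
    match PySem.List.max? scores.items (fun it => it.2) with
    | some winner => if winner.2 > 0 then winner.1 else "general"
    | none => "general"   -- unreachable: the dict has nine entries

-- ===== PORT B =====
-- module constant _PREFIX_INDEX: rule word -> owning branch
def pvPrefixIndex : PySem.Dict String String :=
  pvBranchRules.foldl (fun d p => p.2.foldl (fun d w => d.insert w p.1) d) PySem.Dict.empty

-- module constant _MAX_WORD_LEN = max(map(len, _PREFIX_INDEX))
def pvMaxWordLen : Int :=
  match PySem.List.max? (pvPrefixIndex.keys.map (fun w => (PySem.Str.len w : Int))) (fun v => v) with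
  | some m => m
  | none => 0   -- unreachable: the index has 55 keys

def pick_branch_py_alt (tokens : List String) : String :=
  if tokens = [] then "general"
  else
    let scores0 : PySem.Dict String Int :=
      pvBranchRules.foldl (fun d p => d.insert p.1 0) PySem.Dict.empty
    let scores := tokens.foldl (fun d token =>
      let hit : PySem.Set String :=
        (PySem.List.pyRange 1 (min (PySem.Str.len token : Int) pvMaxWordLen + 1) 1).foldl
          (fun s i =>
            match pvPrefixIndex.get? (PySem.Str.slice token none (some i)) with
            | some b => PySem.Set.add s b
            | none => s) PySem.Set.empty
      hit.foldl (fun d b => d.modify b 0 (· + 1)) d) scores0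
    match PySem.List.max? scores.items (fun it => it.2) with
    | some winner => if winner.2 > 0 then winner.1 else "general"
    | none => "general"   -- unreachable: the dict has nine entries

-- ===== PRECONDITION & SPEC =====
def Spec_pick_branch_py (tokens : List String) (out : String) : Prop := out = pick_branch_py_alt tokens
instance (tokens : List String) (out : String) : Decidable (Spec_pick_branch_py tokens out) := by unfold Spec_pick_branch_py; infer_instance

-- ===== CLAIM (what is proved, stated in full; the proofs are below) =====
def Claim_equal_pick_branch_py : Prop := ∀ (tokens : List String), Dom_pick_branch_py tokens → Spec_pick_branch_py tokens (pick_branch_py tokens)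

-- ===== LEMMAS AND PROOFS =====

-- membership in A's combined test is plain prefix-matching
theorem pv_cond_eq (t : String) (ws : List String) :
    (ws.contains t || ws.any (fun w => PySem.Str.startswith t w))
      = ws.any (fun w => PySem.Str.startswith t w) := by
  cases h : ws.any (fun w => PySem.Str.startswith t w) with
  | true => simp
  | false =>
    simp only [Bool.or_false, Bool.eq_false_iff]
    simp only [List.any_eq_false] at h
    intro hc
    rw [List.contains_iff_mem] at hc
    have := h t hc
    rw [PySem.Str.startswith_eq, PySem.Chars.startswith_iff] at this
    exact this (List.prefix_refl _)

-- ---- A-side loop characterisation ----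
theorem pv_inner_keys (rules : List (String × List String)) (t : String)
    (d : PySem.Dict String Int)
    (hc : ∀ p ∈ rules, d.contains p.1 = true) :
    (rules.foldl (fun d p =>
        if p.2.contains t || p.2.any (fun w => PySem.Str.startswith t w)
        then d.modify p.1 0 (· + 1) else d) d).keys = d.keys := by
  induction rules generalizing d with
  | nil => rfl
  | cons p r ih =>
    rw [List.foldl_cons]
    have hkeys : (if p.2.contains t || p.2.any (fun w => PySem.Str.startswith t w)
        then d.modify p.1 0 (· + 1) else d).keys = d.keys := by
      split
      · rw [PySem.Dict.keys_modify, PySem.Dict.keys_insert_of_contains _ _ (hc p (List.mem_cons_self ..))]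
      · rfl
    rw [ih _ fun q hq => ?_, hkeys]
    rw [PySem.Dict.contains_iff_mem_keys, hkeys, ← PySem.Dict.contains_iff_mem_keys]
    exact hc q (List.mem_cons_of_mem _ hq)

theorem pv_inner_getD (rules : List (String × List String)) (t : String) (b : String)
    (d : PySem.Dict String Int) (hnd : (rules.map Prod.fst).Nodup) :
    (rules.foldl (fun d p =>
        if p.2.contains t || p.2.any (fun w => PySem.Str.startswith t w)
        then d.modify p.1 0 (· + 1) else d) d).getD b 0
      = d.getD b 0 +
        (if rules.any (fun p => p.1 == b &&
            (p.2.contains t || p.2.any (fun w => PySem.Str.startswith t w))) then 1 else 0) := by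
  induction rules generalizing d with
  | nil => simp
  | cons p r ih =>
    rw [List.foldl_cons, List.any_cons, ih _ (List.nodup_cons.mp hnd).2]
    by_cases hb : p.1 = b
    · subst hb
      have hr : r.any (fun q => q.1 == p.1 &&
          (q.2.contains t || q.2.any (fun w => PySem.Str.startswith t w))) = false := by
        rw [List.any_eq_false]
        intro q hq
        have hne : q.1 ≠ p.1 := fun he => (List.nodup_cons.mp hnd).1 (he ▸ List.mem_map_of_mem hq)
        simp only [Bool.not_eq_true, Bool.and_eq_false_iff]
        exact Or.inl (beq_eq_false_iff_ne.mpr hne)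
      rw [hr, Bool.or_false, beq_self_eq_true, Bool.true_and]
      split
      · rw [PySem.Dict.getD_modify, if_pos rfl]
        simp
      · simp
    · have h1 : (p.1 == b) = false := beq_eq_false_iff_ne.mpr hb
      rw [h1, Bool.false_and, Bool.false_or]
      split
      · rw [PySem.Dict.getD_modify, if_neg (fun he => hb he.symm)]
      · rfl

theorem pv_outer_keys (rules : List (String × List String)) (tokens : List String)
    (d : PySem.Dict String Int)
    (hc : ∀ p ∈ rules, d.contains p.1 = true) :
    (tokens.foldl (fun d token => rules.foldl (fun d p =>
        if p.2.contains token || p.2.any (fun w => PySem.Str.startswith token w)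
        then d.modify p.1 0 (· + 1) else d) d) d).keys = d.keys := by
  induction tokens generalizing d with
  | nil => rfl
  | cons tk ts ih =>
    rw [List.foldl_cons]
    have hk := pv_inner_keys rules tk d hc
    rw [ih _ fun q hq => ?_, hk]
    rw [PySem.Dict.contains_iff_mem_keys, hk, ← PySem.Dict.contains_iff_mem_keys]
    exact hc q hq

theorem pv_outer_getD (rules : List (String × List String)) (tokens : List String) (b : String)
    (d : PySem.Dict String Int) (hnd : (rules.map Prod.fst).Nodup)
    (hc : ∀ p ∈ rules, d.contains p.1 = true) :
    (tokens.foldl (fun d token => rules.foldl (fun d p =>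
        if p.2.contains token || p.2.any (fun w => PySem.Str.startswith token w)
        then d.modify p.1 0 (· + 1) else d) d) d).getD b 0
      = d.getD b 0 +
        (tokens.countP (fun t => rules.any (fun p => p.1 == b &&
            (p.2.contains t || p.2.any (fun w => PySem.Str.startswith t w)))) : Int) := by
  induction tokens generalizing d with
  | nil => simp
  | cons tk ts ih =>
    rw [List.foldl_cons]
    have hk := pv_inner_keys rules tk d hc
    rw [ih _ fun q hq => ?_, pv_inner_getD rules tk b d hnd]
    · rw [List.countP_cons]
      push_cast
      split
      · simp; ring
      · simp
    · rw [PySem.Dict.contains_iff_mem_keys, hk, ← PySem.Dict.contains_iff_mem_keys]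
      exact hc q hq

-- ---- B-side: the per-token hit set ----
def pvHit (t : String) : PySem.Set String :=
  (PySem.List.pyRange 1 (min (PySem.Str.len t : Int) pvMaxWordLen + 1) 1).foldl
    (fun s i =>
      match pvPrefixIndex.get? (PySem.Str.slice t none (some i)) with
      | some b => PySem.Set.add s b
      | none => s) PySem.Set.empty

theorem pv_mem_foldl_addopt (l : List Int) (f : Int → Option String)
    (s : PySem.Set String) (b : String) :
    (b ∈ l.foldl (fun s i => match f i with | some x => PySem.Set.add s x | none => s) s)
      ↔ b ∈ s ∨ ∃ i ∈ l, f i = some b := by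
  induction l generalizing s with
  | nil => simp
  | cons i l ih =>
    rw [List.foldl_cons, ih]
    cases hf : f i with
    | none => simp [hf]
    | some x =>
      simp only [PySem.Set.mem_add, List.mem_cons]
      constructor
      · rintro (⟨hs | rfl⟩ | ⟨j, hj, hjb⟩)
        · exact Or.inl hs
        · exact Or.inr ⟨i, Or.inl rfl, hf⟩
        · exact Or.inr ⟨j, Or.inr hj, hjb⟩
      · rintro (hs | ⟨j, (rfl | hj), hjb⟩)
        · exact Or.inl (Or.inl hs)
        · rw [hf] at hjb; exact Or.inl (Or.inr (Option.some.inj hjb).symm)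
        · exact Or.inr ⟨j, hj, hjb⟩

theorem pv_nodup_foldl_addopt (l : List Int) (f : Int → Option String)
    (s : PySem.Set String) (hs : s.Nodup) :
    (l.foldl (fun s i => match f i with | some x => PySem.Set.add s x | none => s) s).Nodup := by
  induction l generalizing s with
  | nil => exact hs
  | cons i l ih =>
    rw [List.foldl_cons]
    cases hf : f i with
    | none => simp only; exact ih s hs
    | some x => simp only; exact ih _ (PySem.Set.nodup_add s x hs)

theorem pv_mem_hit (t b : String) :
    b ∈ pvHit t ↔ ∃ i ∈ PySem.List.pyRange 1 (min (PySem.Str.len t : Int) pvMaxWordLen + 1) 1,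
      pvPrefixIndex.get? (PySem.Str.slice t none (some i)) = some b := by
  unfold pvHit
  rw [pv_mem_foldl_addopt _ (fun i => pvPrefixIndex.get? (PySem.Str.slice t none (some i)))]
  simp [PySem.Set.empty]

set_option maxRecDepth 8192 in
theorem pv_hit_nodup (t : String) : (pvHit t).Nodup := by
  unfold pvHit
  exact pv_nodup_foldl_addopt _ (fun i => pvPrefixIndex.get? (PySem.Str.slice t none (some i))) _ List.nodup_nil

-- every branch named by the index is a key of BRANCH_RULES
set_option maxRecDepth 8192 in
theorem pv_hit_sub (t : String) (b : String) (hb : b ∈ pvHit t) :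
    b ∈ pvBranchRules.map Prod.fst := by
  rw [pv_mem_hit] at hb
  obtain ⟨i, _, hg⟩ := hb
  have hm := PySem.Dict.mem_items_of_get?_eq_some _ hg
  have hall : ∀ q ∈ pvPrefixIndex.items, q.2 ∈ pvBranchRules.map Prod.fst := by decide
  exact hall _ hm

-- ---- B-side loop characterisation ----
theorem pvB_inner_keys (t : String) (d : PySem.Dict String Int)
    (hc : ∀ x ∈ pvBranchRules.map Prod.fst, x ∈ d.keys) :
    ((pvHit t).foldl (fun d b => d.modify b 0 (· + 1)) d).keys = d.keys := by
  rw [PySem.Dict.keys_foldl_modify, PySem.Set.update_eq_append_filter]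
  have : (PySem.Set.ofList (pvHit t)).filter (fun y => !(PySem.Set.contains d.keys y)) = [] := by
    rw [List.filter_eq_nil_iff]
    intro y hy
    rw [PySem.Set.mem_ofList] at hy
    simp only [Bool.not_eq_true', Bool.not_eq_false]
    exact (PySem.Set.contains_iff _ _).mpr (hc y (pv_hit_sub t y hy))
  rw [this, List.append_nil]

theorem pvB_inner_getD (t b : String) (d : PySem.Dict String Int) :
    ((pvHit t).foldl (fun d b => d.modify b 0 (· + 1)) d).getD b 0
      = d.getD b 0 + (if b ∈ pvHit t then 1 else 0) := by
  rw [PySem.Dict.getD_foldl_modify_add_one]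
  by_cases hb : b ∈ pvHit t
  · rw [if_pos hb, List.count_eq_one_of_mem (pv_hit_nodup t) hb]
    norm_num
  · rw [if_neg hb, List.count_eq_zero.mpr hb]
    rfl

theorem pvB_outer_keys (tokens : List String) (d : PySem.Dict String Int)
    (hc : ∀ x ∈ pvBranchRules.map Prod.fst, x ∈ d.keys) :
    (tokens.foldl (fun d token => (pvHit token).foldl (fun d b => d.modify b 0 (· + 1)) d) d).keys
      = d.keys := by
  induction tokens generalizing d with
  | nil => rfl
  | cons tk ts ih =>
    rw [List.foldl_cons]
    have hk := pvB_inner_keys tk d hc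
    rw [ih _ fun q hq => ?_, hk]
    rw [hk]; exact hc q hq

theorem pvB_outer_getD (tokens : List String) (b : String) (d : PySem.Dict String Int) :
    (tokens.foldl (fun d token => (pvHit token).foldl (fun d b => d.modify b 0 (· + 1)) d) d).getD b 0
      = d.getD b 0 + (tokens.countP (fun t => decide (b ∈ pvHit t)) : Int) := by
  induction tokens generalizing d with
  | nil => simp
  | cons tk ts ih =>
    rw [List.foldl_cons, ih, pvB_inner_getD, List.countP_cons]
    push_cast
    by_cases hb : b ∈ pvHit tk
    · rw [if_pos hb]; simp [hb]; ring
    · rw [if_neg hb]; simp [hb]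

-- ---- the bridge: A's prefix test and B's index probe agree ----
set_option maxRecDepth 8192 in
theorem pv_maxWordLen_eq : pvMaxWordLen = 12 := by decide

set_option maxRecDepth 8192 in
theorem pv_bridge (b t : String) :
    pvBranchRules.any (fun p => p.1 == b && p.2.any (fun w => PySem.Str.startswith t w))
      = decide (b ∈ pvHit t) := by
  rw [Bool.eq_iff_iff, List.any_eq_true, decide_eq_true_iff, pv_mem_hit]
  constructor
  · rintro ⟨p, hp, hpb⟩
    rw [Bool.and_eq_true, beq_iff_eq, List.any_eq_true] at hpb
    obtain ⟨hpb, w, hw, hsw⟩ := hpb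
    have hpre : w.toList <+: t.toList := by
      rw [PySem.Str.startswith_eq, PySem.Chars.startswith_iff] at hsw; exact hsw
    have hget : ∀ p ∈ pvBranchRules, ∀ w ∈ p.2, pvPrefixIndex.get? w = some p.1 := by decide
    have hlen : ∀ p ∈ pvBranchRules, ∀ w ∈ p.2,
        1 ≤ w.toList.length ∧ w.toList.length ≤ 12 := by decide
    obtain ⟨h1, h12⟩ := hlen p hp w hw
    refine ⟨(w.toList.length : Int), ?_, ?_⟩
    · rw [PySem.List.mem_pyRange_one, pv_maxWordLen_eq, PySem.Str.len_eq]
      have hle := hpre.length_le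
      constructor
      · exact_mod_cast h1
      · have : (w.toList.length : Int) ≤ min (t.toList.length : Int) 12 := by
          apply le_min <;> exact_mod_cast ‹_›
        omega
    · have hsl : PySem.Str.slice t none (some (w.toList.length : Int)) = w := by
        apply String.toList_inj.mp
        rw [PySem.Str.toList_slice, PySem.Chars.slice_eq_listSlice,
          PySem.List.slice_to_natCast]
        exact (List.prefix_iff_eq_take.mp hpre).symm
      rw [hsl, hget p hp w hw, hpb]
  · rintro ⟨i, hi, hg⟩
    have hm := PySem.Dict.mem_items_of_get?_eq_some _ hg
    have hall : ∀ q ∈ pvPrefixIndex.items,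
        ∃ p ∈ pvBranchRules, p.1 = q.2 ∧ q.1 ∈ p.2 := by decide
    obtain ⟨p, hp, hpb, hw⟩ := hall _ hm
    refine ⟨p, hp, ?_⟩
    rw [Bool.and_eq_true, beq_iff_eq, List.any_eq_true]
    refine ⟨hpb, PySem.Str.slice t none (some i), hw, ?_⟩
    rw [PySem.List.mem_pyRange_one] at hi
    have h0 : (0 : Int) ≤ i := by omega
    rw [PySem.Str.startswith_eq, PySem.Chars.startswith_iff, PySem.Str.toList_slice,
      PySem.Chars.slice_eq_listSlice, PySem.List.slice_to _ h0]
    exact List.take_prefix _ _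

-- ===== VERDICT (by name: the statement is the Claim_ definition above) =====
set_option maxHeartbeats 2000000 in
set_option maxRecDepth 8192 in
theorem pick_branch_py_spec : Claim_equal_pick_branch_py := by
  unfold Claim_equal_pick_branch_py
  intro tokens _
  unfold Spec_pick_branch_py
  by_cases he : tokens = []
  · subst he; decide
  · rw [pick_branch_py, pick_branch_py_alt, if_neg he, if_neg he]
    simp only []
    set d0 : PySem.Dict String Int :=
      pvBranchRules.foldl (fun d p => d.insert p.1 0) PySem.Dict.empty with hd0
    have hd0lit : d0 = PySem.Dict.mk [("ops", 0), ("coding", 0), ("health", 0), ("finance", 0),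
        ("security", 0), ("learning", 0), ("family", 0), ("communications", 0),
        ("gaming", 0)] := by decide
    have hc0 : ∀ p ∈ pvBranchRules, d0.contains p.1 = true := by rw [hd0lit]; decide
    have hcB : ∀ x ∈ pvBranchRules.map Prod.fst, x ∈ d0.keys := by rw [hd0lit]; decide
    have hgd0 : ∀ b, d0.getD b 0 = 0 := by
      intro b
      rw [hd0lit, PySem.Dict.getD_eq_get?_getD]
      simp only [PySem.Dict.get?_mk_cons]
      split_ifs <;> rfl
    -- A's scores
    set dA := tokens.foldl (fun d token => pvBranchRules.foldl (fun d p =>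
        if p.2.contains token || p.2.any (fun w => PySem.Str.startswith token w)
        then d.modify p.1 0 (· + 1) else d) d) d0 with hdA
    -- B's scores (its per-token let is pvHit)
    have hBfold : tokens.foldl (fun d token =>
        ((PySem.List.pyRange 1 (min (PySem.Str.len token : Int) pvMaxWordLen + 1) 1).foldl
          (fun s i =>
            match pvPrefixIndex.get? (PySem.Str.slice token none (some i)) with
            | some b => PySem.Set.add s b
            | none => s) PySem.Set.empty).foldl (fun d b => d.modify b 0 (· + 1)) d) d0
        = tokens.foldl (fun d token => (pvHit token).foldl (fun d b => d.modify b 0 (· + 1)) d) d0 := rfl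
    rw [hBfold]
    set dB := tokens.foldl (fun d token => (pvHit token).foldl (fun d b => d.modify b 0 (· + 1)) d) d0 with hdB
    -- both keys are the nine branch names
    have hkA : dA.keys = d0.keys := pv_outer_keys _ _ _ hc0
    have hkB : dB.keys = d0.keys := pvB_outer_keys _ _ hcB
    have hk0nd : d0.keys.Nodup := by rw [hd0lit]; decide
    -- pointwise agreement of the two score dicts
    have hgd : ∀ b, dA.getD b 0 = dB.getD b 0 := by
      intro b
      rw [hdA, hdB, pv_outer_getD _ _ _ _ (by decide) hc0, pvB_outer_getD, hgd0]
      congr 2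
      apply List.countP_congr
      intro t _
      simp only [pv_cond_eq]
      rw [pv_bridge b t]
    -- hence equal items lists, hence the same winner
    have hitems : dA.items = dB.items := by
      rw [PySem.Dict.items_eq_map_keys dA (hkA ▸ hk0nd) 0,
        PySem.Dict.items_eq_map_keys dB (hkB ▸ hk0nd) 0, hkA, hkB]
      exact List.map_congr_left fun k _ => by rw [hgd k]
    rw [hitems]
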